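-- pv_equiv track=rewrite | github.com/chalos18/COSC-Studies | COSC262/final exam revision/final_exam_2023.py | word_chains
-- ===== SOURCE A (Python) =====
-- def word_chains(words, min_length, max_length):
--     """
--     A word chain is:
--     - every word in the sequence is from the given set of words;
--     - no word in the sequence is repeated (i.e. a word appears at most once); and
--     - for every two consecutive words in the sequence, the last letter of the first word is the same as the first letter of the next word.
--     Returns a list of all the possible word chains of length greater than or equal to min_length and less than or equal to max_length
--     """
--     result = []
--     words = list(words)  # Convert set to list to handle indexing
--
--     def backtrack(current_chain):
--         if min_length <= len(current_chain) <= max_length: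
--             result.append(current_chain[:])  # Add a copy of current chain to result
--
--         if len(current_chain) < max_length:
--             last_char = current_chain[-1][-1] if current_chain else None
--             for word in words:
--                 if word not in current_chain and (
--                     not current_chain or word[0] == last_char
--                 ):
--                     current_chain.append(word)
--                     backtrack(current_chain)
--                     current_chain.pop()
--
--     # Start backtracking with each word
--     backtrack([])
--     return result
-- ===== SOURCE B (Python) =====
-- def word_chains(words, min_length, max_length):
--     """Iterative DFS with an explicit stack of partial chains (same results,
--     same order as the recursive backtracking version)."""
--     words = list(words)
--     result = []
--     stack = [[]]
--     while stack:
--         chain = stack.pop()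
--         if min_length <= len(chain) <= max_length:
--             result.append(chain)
--         if len(chain) < max_length:
--             last_char = chain[-1][-1] if chain else None
--             extensions = [chain + [w] for w in words
--                           if w not in chain and (not chain or w[0] == last_char)]
--             stack.extend(reversed(extensions))
--     return result
-- ===== Notes on version B (the rewrite author's own statement) =====
-- stated objective: alternative
-- what changed: Replaces the recursive backtracking with a shared mutable chain by an iterative DFS over an explicit stack of immutable partial chains, recording at pop time and pushing extensions reversed so results come out in the same pre-order.
import Mathlib
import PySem

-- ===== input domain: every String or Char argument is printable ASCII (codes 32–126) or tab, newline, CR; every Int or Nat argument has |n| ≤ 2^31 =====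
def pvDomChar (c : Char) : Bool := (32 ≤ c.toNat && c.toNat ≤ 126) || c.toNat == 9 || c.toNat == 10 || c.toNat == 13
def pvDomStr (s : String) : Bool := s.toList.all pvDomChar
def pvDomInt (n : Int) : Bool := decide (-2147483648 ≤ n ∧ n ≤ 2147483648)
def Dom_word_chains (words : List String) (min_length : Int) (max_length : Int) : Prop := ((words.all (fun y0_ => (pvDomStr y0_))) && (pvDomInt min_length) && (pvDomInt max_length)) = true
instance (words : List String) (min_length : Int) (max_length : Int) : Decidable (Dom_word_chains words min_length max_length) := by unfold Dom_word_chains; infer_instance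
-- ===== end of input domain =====

-- B replaces A's recursive backtracking (shared mutable chain + result list) by an
-- iterative DFS with an explicit stack of immutable partial chains; same value, same order.

-- ===== PORT A =====
-- the condition of A's `if` inside the for-loop (last_char is chain[-1][-1], none when chain is empty)
def chainCond (chain : List String) (w : String) : Bool :=
  !(chain.contains w) &&
    (chain.isEmpty ||
      (PySem.Str.pyGet? w 0 ==
        (match chain.getLast? with
         | some s => PySem.Str.pyGet? s (-1)
         | none => none)))

-- length of chain+[w] (termination bookkeeping for both ports)
theorem wcLenSnoc (chain : List String) (w : String) :
    (chain ++ [w]).length = chain.length + 1 := by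
  rw [List.length_append, List.length_cons, List.length_nil]

-- decrease of A's termination measure (cited by `wcBack` in decreasing_by)
theorem wcBack_dec (max_length : Int) (chain : List String) (w : String)
    (h : (chain.length : Int) < max_length) :
    max_length.toNat - (chain ++ [w]).length < max_length.toNat - chain.length := by
  rw [wcLenSnoc]
  exact Nat.sub_succ_lt_self _ _ (Int.lt_toNat.mpr h)

-- A's nested `backtrack`: record the chain if its length is in range, then, if shorter
-- than max_length, recurse on chain+[word] for each admissible word in word order.
def wcBack (words : List String) (min_length max_length : Int) (chain : List String) :
    List (List String) :=
  (if min_length ≤ (chain.length : Int) ∧ (chain.length : Int) ≤ max_length then [chain] else []) ++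
  (if _h : (chain.length : Int) < max_length then
    words.flatMap (fun w =>
      if chainCond chain w then wcBack words min_length max_length (chain ++ [w]) else [])
   else [])
termination_by max_length.toNat - chain.length
decreasing_by exact wcBack_dec max_length chain w _h

def word_chains (words : List String) (min_length : Int) (max_length : Int) : List (List String) :=
  wcBack words min_length max_length []

-- ===== PORT B =====
-- potential used only for termination of the stack loop
def wcPot (words : List String) (max_length : Int) (chain : List String) : Nat :=
  (words.length + 1) ^ (max_length.toNat - chain.length)

def wcMeasure (words : List String) (max_length : Int) (stack : List (List String)) : Nat :=
  (stack.map (wcPot words max_length)).sum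

-- the extension list built at each pop (factored out so the loop's recursion stays plain)
def wcExt (words : List String) (max_length : Int) (chain : List String) : List (List String) :=
  if (chain.length : Int) < max_length then
    (words.filter (chainCond chain)).map (fun w => chain ++ [w]) else []

theorem wcSumMapConst {A : Type} (l : List A) (c : Nat) :
    (l.map (fun _ => c)).sum = l.length * c := by
  induction l with
  | nil => exact (Nat.zero_mul c).symm
  | cons x xs ih =>
    rw [List.map_cons, List.sum_cons, ih, List.length_cons, Nat.succ_mul]
    exact Nat.add_comm c _

theorem wcMeasure_step (words : List String) (max_length : Int) (chain : List String)
    (rest : List (List String)) :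
    wcMeasure words max_length (wcExt words max_length chain ++ rest)
      < wcMeasure words max_length (chain :: rest) := by
  have hpos : ∀ k, 0 < (words.length + 1) ^ k := fun k => Nat.pow_pos (Nat.succ_pos _)
  have hgoal : ((wcExt words max_length chain).map (wcPot words max_length)).sum
      < wcPot words max_length chain := by
    by_cases h : (chain.length : Int) < max_length
    · have h1 : chain.length < max_length.toNat := Int.lt_toNat.mpr h
      have hk : max_length.toNat - chain.length
          = (max_length.toNat - (chain.length + 1)) + 1 := by
        rw [Nat.sub_add_eq]
        exact (Nat.succ_pred_eq_of_pos (Nat.sub_pos_of_lt h1)).symm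
      have hconst : ∀ w : String, wcPot words max_length (chain ++ [w])
          = (words.length + 1) ^ (max_length.toNat - (chain.length + 1)) := by
        intro w
        rw [wcPot, wcLenSnoc]
      have hfun : (wcPot words max_length ∘ fun w => chain ++ [w])
          = fun (_ : String) =>
              (words.length + 1) ^ (max_length.toNat - (chain.length + 1)) :=
        funext (fun w => hconst w)
      rw [wcExt, if_pos h, List.map_map, hfun, wcSumMapConst]
      have hle : (words.filter (chainCond chain)).length *
            (words.length + 1) ^ (max_length.toNat - (chain.length + 1))
          ≤ words.length * (words.length + 1) ^ (max_length.toNat - (chain.length + 1)) :=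
        Nat.mul_le_mul_right _ (List.length_filter_le _ _)
      have hlt : words.length *
            (words.length + 1) ^ (max_length.toNat - (chain.length + 1))
          < (words.length + 1) *
            (words.length + 1) ^ (max_length.toNat - (chain.length + 1)) :=
        Nat.mul_lt_mul_of_lt_of_le (Nat.lt_succ_self _) (Nat.le_refl _) (hpos _)
      have hpow : wcPot words max_length chain
          = (words.length + 1) *
            (words.length + 1) ^ (max_length.toNat - (chain.length + 1)) := by
        rw [wcPot, hk, Nat.pow_succ, Nat.mul_comm]
      rw [hpow]
      exact Nat.lt_of_le_of_lt hle hlt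
    · rw [wcExt, if_neg h]
      exact hpos _
  have hsplit : wcMeasure words max_length (wcExt words max_length chain ++ rest)
      = ((wcExt words max_length chain).map (wcPot words max_length)).sum
        + wcMeasure words max_length rest := by
    simp only [wcMeasure, List.map_append, List.sum_append]
  have hcons : wcMeasure words max_length (chain :: rest)
      = wcPot words max_length chain + wcMeasure words max_length rest := by
    simp only [wcMeasure, List.map_cons, List.sum_cons]
  rw [hsplit, hcons]
  exact Nat.add_lt_add_right hgoal _

-- B's while loop: the head of `stack` is the top (pop from the front); pushing the
-- reversed extension list in Python leaves them at the top in word order, i.e. the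
-- new stack is `ext ++ rest`.  Results are recorded at pop time.
def wcLoop (words : List String) (min_length max_length : Int) (stack : List (List String)) :
    List (List String) :=
  match stack with
  | [] => []
  | chain :: rest =>
    let rec_ := if min_length ≤ (chain.length : Int) ∧ (chain.length : Int) ≤ max_length
                then [chain] else []
    let ext := wcExt words max_length chain
    rec_ ++ wcLoop words min_length max_length (ext ++ rest)
termination_by wcMeasure words max_length stack
decreasing_by exact wcMeasure_step words max_length chain rest

def word_chains_alt (words : List String) (min_length : Int) (max_length : Int) :
    List (List String) :=
  wcLoop words min_length max_length [[]]

-- ===== PRECONDITION & SPEC =====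
-- Pre_ excludes exactly the inputs on which A raises IndexError: an empty word in
-- `words` together with max_length ≥ 2 (then ''[0] or chain[-1][-1] is evaluated).
def Pre_word_chains (words : List String) (min_length : Int) (max_length : Int) : Prop :=
  ¬("" ∈ words ∧ 2 ≤ max_length)
instance (words : List String) (min_length : Int) (max_length : Int) :
    Decidable (Pre_word_chains words min_length max_length) := by
  unfold Pre_word_chains; infer_instance

def pvWitness_word_chains : List String × Int × Int := (["ab", "ba", "ac"], 1, 3)

def Spec_word_chains (words : List String) (min_length : Int) (max_length : Int) (out : List (List String)) : Prop := out = word_chains_alt words min_length max_length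
instance (words : List String) (min_length : Int) (max_length : Int) (out : List (List String)) : Decidable (Spec_word_chains words min_length max_length out) := by unfold Spec_word_chains; infer_instance

-- ===== CLAIM (what is proved, stated in full; the proofs are below) =====
def Claim_equal_word_chains : Prop := ∀ (words : List String) (min_length : Int) (max_length : Int), Dom_word_chains words min_length max_length → Pre_word_chains words min_length max_length → Spec_word_chains words min_length max_length (word_chains words min_length max_length)

-- ===== LEMMAS AND PROOFS =====

theorem flatMap_if_filter {α β : Type} (l : List α) (p : α → Bool) (f : α → List β) :
    l.flatMap (fun w => if p w then f w else []) = (l.filter p).flatMap f := by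
  induction l with
  | nil => rfl
  | cons x xs ih =>
    by_cases h : p x <;> simp [List.flatMap_cons, h, ih]

-- the stack loop computes the concatenation of A's subtrees over the stack
theorem wcLoop_eq_flatMap (words : List String) (min_length max_length : Int)
    (stack : List (List String)) :
    wcLoop words min_length max_length stack
      = stack.flatMap (wcBack words min_length max_length) := by
  fun_induction wcLoop words min_length max_length stack with
  | case1 => rfl
  | case2 chain rest rec_ ext ih =>
    rw [ih, List.flatMap_cons, List.flatMap_append]
    have hsub : wcBack words min_length max_length chain = rec_ ++ ext.flatMap (wcBack words min_length max_length) := by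
      rw [wcBack]
      congr 1
      by_cases h : (chain.length : Int) < max_length
      · rw [dif_pos h]
        show _ = (wcExt words max_length chain).flatMap _
        rw [wcExt, if_pos h, flatMap_if_filter, List.flatMap_map]
      · rw [dif_neg h]
        show ([] : List (List String)) = (wcExt words max_length chain).flatMap _
        rw [wcExt, if_neg h]
        rfl
    rw [hsub, List.append_assoc]

-- ===== VERDICT (by name: the statement is the Claim_ definition above) =====
theorem word_chains_spec : Claim_equal_word_chains := by
  intro words min_length max_length _ _
  unfold Spec_word_chains word_chains word_chains_alt
  rw [wcLoop_eq_flatMap]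
  simp
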